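-- pv_equiv track=rewrite | github.com/adrienycart/MLM_decoding | mlm_training/pianoroll.py | scale_template
-- ===== SOURCE A (Python) =====
-- def scale_template(scale,note_range=[21,109]):
--     #Returns a 88*1 matrix with True if the corresponding pitch is in the given scale
--     #If scale is minor, natural, melodic and harmonic minor are accepted.
--
--     scale = int(scale)
--     note_min, note_max = note_range
--     key = scale%12
--     is_major = scale//12==0
--     #Treat everything as in C
--     note_min_t = note_min-key
--     note_max_t = note_max-key
--     octave_max = note_max_t//12
--     octave_min = note_min_t//12
--
--     if is_major:
--         scale = [0,2,4,5,7,9,11]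
--     else:
--         scale = [0,2,3,5,7,8,9,10,11]
--     current_scale = [x+key for x in scale]
--     single_notes = []
--
--     for i in range(octave_min,octave_max+1):
--         to_add =  [12*i+x for x in scale if 12*i+x>= note_min_t and 12*i+x< note_max_t]
--         single_notes = single_notes + to_add
--     #Transpose back to the correct key
--     output = [x + key for x in single_notes]
--     return output
-- ===== SOURCE B (Python) =====
-- def scale_template(scale, note_range=[21, 109]):
--     # Single linear scan over the pitch range, testing scale membership by modular arithmetic.
--     scale = int(scale)
--     note_min, note_max = note_range
--     key = scale % 12
--     if scale // 12 == 0: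
--         degrees = (0, 2, 4, 5, 7, 9, 11)
--     else:
--         degrees = (0, 2, 3, 5, 7, 8, 9, 10, 11)
--     return [p for p in range(note_min, note_max) if (p - key) % 12 in degrees]
-- ===== Notes on version B (the rewrite author's own statement) =====
-- stated objective: simpler
-- what changed: Replaces the per-octave generate-filter-concatenate loop plus transpose-back with a single linear scan over range(note_min, note_max) testing (p-key)%12 against the scale-degree set.
import Mathlib
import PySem

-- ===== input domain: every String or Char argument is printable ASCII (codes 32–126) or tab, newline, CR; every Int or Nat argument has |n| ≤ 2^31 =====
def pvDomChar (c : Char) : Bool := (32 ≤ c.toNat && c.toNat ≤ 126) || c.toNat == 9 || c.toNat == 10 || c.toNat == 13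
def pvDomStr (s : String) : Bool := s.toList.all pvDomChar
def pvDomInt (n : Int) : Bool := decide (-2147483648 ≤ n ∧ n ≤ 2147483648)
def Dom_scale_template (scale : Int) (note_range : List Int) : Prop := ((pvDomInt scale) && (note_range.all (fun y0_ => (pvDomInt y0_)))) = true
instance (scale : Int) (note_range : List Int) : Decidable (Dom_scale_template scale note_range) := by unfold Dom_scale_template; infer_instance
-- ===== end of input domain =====

-- B replaces A's per-octave generate/filter/concatenate loop (in a transposed coordinate
-- system, transposed back at the end) by one linear scan of the pitch range with a
-- modular scale-membership test; objective: simpler.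

-- ===== PORT A =====
def scale_template (scale : Int) (note_range : List Int) : List Int :=
  match note_range with
  | [note_min, note_max] =>
    let key := PySem.Int.mod scale 12
    let is_major := PySem.Int.floordiv scale 12 == 0
    let note_min_t := note_min - key
    let note_max_t := note_max - key
    let octave_max := PySem.Int.floordiv note_max_t 12
    let octave_min := PySem.Int.floordiv note_min_t 12
    let sc : List Int := if is_major then [0,2,4,5,7,9,11] else [0,2,3,5,7,8,9,10,11]
    let single_notes :=
      (PySem.List.pyRange octave_min (octave_max + 1) 1).foldl
        (fun acc i =>
          acc ++ ((sc.filter (fun x => 12*i+x ≥ note_min_t && 12*i+x < note_max_t)).map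
                    (fun x => 12*i+x))) []
    single_notes.map (fun x => x + key)
  | _ => []  -- Python raises ValueError here (unpacking); excluded by Pre_

-- ===== PORT B =====
def scale_template_alt (scale : Int) (note_range : List Int) : List Int :=
  -- 'note_min, note_max = note_range' raises ValueError unless the length is 2 (excluded by Pre_)
  if note_range.length == 2 then
    let note_min := PySem.List.pyGetD note_range 0 0
    let note_max := PySem.List.pyGetD note_range 1 0
    let key := PySem.Int.mod scale 12
    let degrees : List Int :=
      if PySem.Int.floordiv scale 12 == 0 then [0,2,4,5,7,9,11] else [0,2,3,5,7,8,9,10,11]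
    (PySem.List.pyRange note_min note_max 1).filter
      (fun p => degrees.contains (PySem.Int.mod (p - key) 12))
  else []

-- ===== PRECONDITION & SPEC =====
-- A's 'note_min, note_max = note_range' raises ValueError unless note_range has exactly 2 elements.
def Pre_scale_template (scale : Int) (note_range : List Int) : Prop := note_range.length = 2
instance (scale : Int) (note_range : List Int) : Decidable (Pre_scale_template scale note_range) := by
  unfold Pre_scale_template; infer_instance
def pvWitness_scale_template : Int × List Int := (0, [21, 109])
def Spec_scale_template (scale : Int) (note_range : List Int) (out : List Int) : Prop := out = scale_template_alt scale note_range
instance (scale : Int) (note_range : List Int) (out : List Int) : Decidable (Spec_scale_template scale note_range out) := by unfold Spec_scale_template; infer_instance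

-- ===== CLAIM (what is proved, stated in full; the proofs are below) =====
def Claim_equal_scale_template : Prop := ∀ (scale : Int) (note_range : List Int), Dom_scale_template scale note_range → Pre_scale_template scale note_range → Spec_scale_template scale note_range (scale_template scale note_range)

-- ===== LEMMAS AND PROOFS =====

-- Core lemma, parametric in the scale-degree list: A's octave loop (flattened and
-- transposed back by +key) equals B's single filtered scan, for any strictly sorted
-- degree list contained in [0,12).
theorem scale_octave_loop_eq_scan (degs : List Int)
    (hd : ∀ x ∈ degs, 0 ≤ x ∧ x < 12) (hp : degs.Pairwise (· < ·))
    (lo hi key : Int) :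
    (((PySem.List.pyRange (PySem.Int.floordiv (lo - key) 12)
        (PySem.Int.floordiv (hi - key) 12 + 1) 1).foldl
        (fun acc i =>
          acc ++ ((degs.filter (fun x => 12*i+x ≥ lo - key && 12*i+x < hi - key)).map
                    (fun x => 12*i+x))) []).map (fun x => x + key))
      = (PySem.List.pyRange lo hi 1).filter
          (fun p => degs.contains (PySem.Int.mod (p - key) 12)) := by
  rw [PySem.Int.floordiv_eq_ediv_of_pos (by omega : (0:Int) < 12),
      PySem.Int.floordiv_eq_ediv_of_pos (by omega : (0:Int) < 12),
      PySem.List.foldl_append_eq_flatMap, List.nil_append]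
  -- both sides are strictly sorted with the same membership
  have hmod : ∀ p : Int, PySem.Int.mod (p - key) 12 = (p - key) % 12 :=
    fun p => PySem.Int.mod_eq_emod_of_pos (by omega)
  have hApw : (((PySem.List.pyRange ((lo - key) / 12) ((hi - key) / 12 + 1) 1).flatMap
      (fun i => (degs.filter (fun x => 12*i+x ≥ lo - key && 12*i+x < hi - key)).map
        (fun x => 12*i+x))).map (fun x => x + key)).Pairwise (· < ·) := by
    refine List.Pairwise.map _ (fun a b h => by omega) ?_
    rw [List.pairwise_flatMap]
    constructor
    · intro i _
      exact List.Pairwise.map _ (fun a b h => by omega) (hp.filter _)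
    · refine (PySem.List.pairwise_lt_pyRange_one _ _).imp ?_
      intro i j hij x hx y hy
      rcases List.mem_map.1 hx with ⟨a, ha, rfl⟩
      rcases List.mem_map.1 hy with ⟨b, hb, rfl⟩
      have ha' := hd a (List.mem_of_mem_filter ha)
      have hb' := hd b (List.mem_of_mem_filter hb)
      omega
  have hBpw : ((PySem.List.pyRange lo hi 1).filter
      (fun p => degs.contains (PySem.Int.mod (p - key) 12))).Pairwise (· < ·) :=
    (PySem.List.pairwise_lt_pyRange_one _ _).filter _
  have hmem : ∀ p : Int,
      p ∈ ((PySem.List.pyRange ((lo - key) / 12) ((hi - key) / 12 + 1) 1).flatMap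
        (fun i => (degs.filter (fun x => 12*i+x ≥ lo - key && 12*i+x < hi - key)).map
          (fun x => 12*i+x))).map (fun x => x + key)
      ↔ p ∈ (PySem.List.pyRange lo hi 1).filter
          (fun p => degs.contains (PySem.Int.mod (p - key) 12)) := by
    intro p
    simp only [List.mem_map, List.mem_flatMap, List.mem_filter,
      PySem.List.mem_pyRange_one, List.contains_iff_mem, hmod, decide_eq_true_eq,
      Bool.and_eq_true, ge_iff_le, decide_eq_true_eq]
    constructor
    · rintro ⟨q, ⟨i, ⟨hi1, hi2⟩, x, ⟨hxd, hx1, hx2⟩, rfl⟩, rfl⟩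
      have hx12 := hd x hxd
      have hmodx : (12*i+x + key - key) % 12 = x := by omega
      rw [hmodx]
      exact ⟨⟨by omega, by omega⟩, hxd⟩
    · rintro ⟨⟨h1, h2⟩, hr⟩
      have h12 := hd _ hr
      refine ⟨p - key, ⟨(p - key) / 12, ⟨by omega, by omega⟩,
        (p - key) % 12, ⟨hr, by omega, by omega⟩, by omega⟩, by omega⟩
  have hperm := (List.perm_ext_iff_of_nodup
    (hApw.imp (fun h => ne_of_lt h)) (hBpw.imp (fun h => ne_of_lt h))).2 hmem
  exact hperm.eq_of_pairwise (fun a b _ _ h1 h2 => by omega) hApw hBpw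

theorem scale_template_spec : Claim_equal_scale_template := by
  intro scale note_range _ hpre
  unfold Spec_scale_template
  match note_range, hpre with
  | [note_min, note_max], _ =>
    simp only [scale_template, scale_template_alt]
    by_cases h : PySem.Int.floordiv scale 12 == 0 <;>
      simp only [h, if_true, if_false, Bool.false_eq_true] <;>
      exact scale_octave_loop_eq_scan _ (by decide) (by decide) _ _ _
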